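-- pv_equiv track=rewrite | github.com/kokojong/programmers_swift | 숫자게임.py | solution
-- ===== SOURCE A (Python) =====
-- import heapq
--
-- def solution(A, B):
--     answer = 0
--     # A를 정렬함
--     # B를 힙에 넣는다
--     # 힙에서 꺼낸게 A의 가장앞보다 크면 그대로 진행(이김)
--     # 같아도 그대로 진행(승점은x) -> 앞에거랑 같아도 다음거랑 비교해야함
--     # A의 가장 앞보다 작으면 (A의 누구도 이길수 없음) A의 가장 뒤에사람이랑 붙임
--     A.sort()
--     heapq.heapify(B)
--
--     while B:
--         a = A[0]  # A에서 가장 작은것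
--         b = heapq.heappop(B)  # B에서 가장 작은것
--         if b > a:
--             A.pop(0)
--             answer += 1
--         # elif b == a:
--         #     A.pop(0)
--         #     answer += 0
--         else:
--             A.pop()
--             answer += 0
--
--     return answer
-- ===== SOURCE B (Python) =====
-- def solution(A, B):
--     # Sort both ascending and walk B with a single index into sorted(A):
--     # each b beats the smallest not-yet-beaten A element if it is strictly larger.
--     As = sorted(A)
--     Bs = sorted(B)
--     i = 0
--     for b in Bs:
--         if i < len(As) and As[i] < b:
--             i += 1
--     return i
-- ===== Notes on version B (the rewrite author's own statement) =====
-- stated objective: faster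
-- what changed: Replaced the destructive loop (heappop from B, list.pop(0)/pop() on A, O(n) each) by sorting both lists once and a single two-pointer scan that only advances an index into sorted(A).
import Mathlib
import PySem

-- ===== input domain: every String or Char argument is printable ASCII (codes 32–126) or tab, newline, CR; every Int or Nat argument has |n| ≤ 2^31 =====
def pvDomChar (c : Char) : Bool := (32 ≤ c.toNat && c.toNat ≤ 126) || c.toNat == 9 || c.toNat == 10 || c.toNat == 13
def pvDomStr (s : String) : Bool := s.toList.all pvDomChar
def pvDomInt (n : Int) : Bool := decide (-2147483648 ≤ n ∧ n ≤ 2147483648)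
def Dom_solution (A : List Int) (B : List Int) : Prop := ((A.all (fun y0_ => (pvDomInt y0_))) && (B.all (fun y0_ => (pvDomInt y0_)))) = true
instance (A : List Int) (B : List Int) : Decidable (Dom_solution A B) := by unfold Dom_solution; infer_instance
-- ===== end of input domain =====

-- B sorts both lists once and counts wins with a single index scan instead of A's
-- destructive heappop / list.pop loop (both mutate their arguments in Python; the
-- equivalence proved here is about the return value only).


-- ===== PORT A =====
-- the while-loop: heappop extracts the minimum of B (exact at the value level for
-- Int elements: min?, then remove the first occurrence of that value); A[0] is
-- headD (A nonempty under Pre_), A.pop(0) is tail, A.pop() is dropLast.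
lemma erase_length_lt {b : Int} {Bs : List Int} (hb : b ∈ Bs) :
    (Bs.erase b).length < Bs.length := by
  have h1 := List.length_erase_of_mem hb
  have h2 : 0 < Bs.length := List.length_pos_of_mem hb
  omega

def solutionGo (As : List Int) (Bs : List Int) (ans : Int) : Int :=
  match h : PySem.List.min? Bs (fun x => x) with
  | none => ans
  | some b =>
      let Bs' := (PySem.List.remove? Bs b).getD []
      if As.headD 0 < b then solutionGo As.tail Bs' (ans + 1)
      else solutionGo As.dropLast Bs' ans
termination_by Bs.length
decreasing_by
  all_goals
    simp only [PySem.List.remove?_eq_some_erase Bs b (PySem.List.min?_mem h), Option.getD_some]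
    exact erase_length_lt (PySem.List.min?_mem h)

def solution (A : List Int) (B : List Int) : Int :=
  solutionGo (PySem.List.sorted A (fun x => x) false) B 0

-- ===== PORT B =====
def solution_alt (A : List Int) (B : List Int) : Int :=
  let As := PySem.List.sorted A (fun x => x) false
  let Bs := PySem.List.sorted B (fun x => x) false
  Int.ofNat (Bs.foldl (fun i b => if i < As.length ∧ As.getD i 0 < b then i + 1 else i) 0)

-- ===== PRECONDITION & SPEC =====
-- A raises IndexError (A[0] on an emptied list) when B has more elements than A.
def Pre_solution (A : List Int) (B : List Int) : Prop := B.length ≤ A.length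
instance (A : List Int) (B : List Int) : Decidable (Pre_solution A B) := by unfold Pre_solution; infer_instance
def pvWitness_solution : List Int × List Int := ([3, 1, 2], [2, 3])

def Spec_solution (A : List Int) (B : List Int) (out : Int) : Prop := out = solution_alt A B
instance (A : List Int) (B : List Int) (out : Int) : Decidable (Spec_solution A B out) := by unfold Spec_solution; infer_instance

-- ===== CLAIM (what is proved, stated in full; the proofs are below) =====
def Claim_equal_solution : Prop := ∀ (A : List Int) (B : List Int), Dom_solution A B → Pre_solution A B → Spec_solution A B (solution A B)

-- ===== LEMMAS AND PROOFS =====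

-- B's inner step, with sorted(A) abstracted out
def altStep (As : List Int) (i : Nat) (b : Int) : Nat :=
  if i < As.length ∧ As.getD i 0 < b then i + 1 else i

-- A's loop once the extract-min order of B is named: consume a sorted list head-first
def goS (As : List Int) (bs : List Int) (ans : Int) : Int :=
  match bs with
  | [] => ans
  | b :: rest => if As.headD 0 < b then goS As.tail rest (ans + 1) else goS As.dropLast rest ans

lemma sorted_cons_min (Bs : List Int) (b : Int)
    (h : PySem.List.min? Bs (fun x => x) = some b) :
    PySem.List.sorted Bs (fun x => x) false =
      b :: PySem.List.sorted (Bs.erase b) (fun x => x) false := by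
  have hb : b ∈ Bs := PySem.List.min?_mem h
  apply PySem.List.eq_of_perm_of_pairwise_le_of_injective (fun x => x) (fun _ _ hxy => hxy)
  · exact (PySem.List.sorted_perm Bs _ _).trans
      ((List.perm_cons_erase hb).trans (List.Perm.cons b (PySem.List.sorted_perm _ _ _).symm))
  · exact PySem.List.sorted_pairwise Bs (fun x => x)
  · refine List.Pairwise.cons ?_ (PySem.List.sorted_pairwise _ (fun x => x))
    intro y hy
    exact PySem.List.min?_isMin h y (List.mem_of_mem_erase ((PySem.List.mem_sorted _ _ _ _).1 hy))

lemma solutionGo_eq_goS (Bs As : List Int) (ans : Int) :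
    solutionGo As Bs ans = goS As (PySem.List.sorted Bs (fun x => x) false) ans := by
  induction hn : Bs.length using Nat.strong_induction_on generalizing Bs As ans with
  | _ n ih =>
    rw [solutionGo]
    cases h : PySem.List.min? Bs (fun x => x) with
    | none =>
      have : Bs = [] := (PySem.List.min?_eq_none_iff _ _).1 h
      subst this; simp [goS, PySem.List.sorted]
    | some b =>
      have hb : b ∈ Bs := PySem.List.min?_mem h
      rw [sorted_cons_min Bs b h]
      simp only [PySem.List.remove?_eq_some_erase Bs b hb, Option.getD_some, goS]
      have hlt : (Bs.erase b).length < n := hn ▸ erase_length_lt hb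
      split <;> rw [ih _ hlt _ _ _ rfl]

lemma goS_eq_foldl (As bs : List Int) (i m : Nat) (ans : Int)
    (h1 : bs.length ≤ m) (h2 : i + m ≤ As.length) :
    goS ((As.drop i).take m) bs ans = ans + ((bs.foldl (altStep As) i : Nat) : Int) - i := by
  induction bs generalizing i m ans with
  | nil => simp [goS]
  | cons b rest ih =>
    have hm1 : rest.length + 1 ≤ m := by simpa using h1
    obtain ⟨m', rfl⟩ : ∃ m', m = m' + 1 := ⟨m - 1, by omega⟩
    have hi : i < As.length := by omega
    have hdrop : As.drop i = As[i] :: As.drop (i + 1) := List.drop_eq_getElem_cons hi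
    have htake : (As.drop i).take (m' + 1) = As[i] :: (As.drop (i + 1)).take m' := by
      rw [hdrop]; rfl
    have hgd : As.getD i 0 = As[i] := List.getD_eq_getElem As 0 hi
    have hdl : ((As.drop i).take (m' + 1)).dropLast = (As.drop i).take m' := by
      have hL : (As.drop i).length = As.length - i := List.length_drop
      rw [List.dropLast_eq_take, List.length_take, List.take_take]
      congr 1
      omega
    simp only [goS, htake, List.headD_cons, List.tail_cons, List.foldl_cons]
    by_cases hc : As[i] < b
    · rw [if_pos hc]
      have hstep : altStep As i b = i + 1 := by
        unfold altStep; rw [if_pos ⟨hi, by rw [hgd]; exact hc⟩]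
      rw [ih (i + 1) m' (ans + 1) (by omega) (by omega), hstep]
      push_cast; ring
    · rw [if_neg hc, ← htake, hdl]
      have hstep : altStep As i b = i := by
        unfold altStep; rw [if_neg]
        rintro ⟨-, hlt2⟩; rw [hgd] at hlt2; exact hc hlt2
      rw [ih i m' ans (by omega) (by omega), hstep]

-- ===== VERDICT (by name: the statement is the Claim_ definition above) =====
theorem solution_spec : Claim_equal_solution := by
  intro A B _ hpre
  unfold Pre_solution at hpre
  show solutionGo (PySem.List.sorted A (fun x => x) false) B 0 =
    Int.ofNat ((PySem.List.sorted B (fun x => x) false).foldl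
      (altStep (PySem.List.sorted A (fun x => x) false)) 0)
  set As := PySem.List.sorted A (fun x => x) false with hAs
  set Bs := PySem.List.sorted B (fun x => x) false with hBs
  have hlenA : As.length = A.length := PySem.List.length_sorted A _ _
  have hlenB : Bs.length = B.length := PySem.List.length_sorted B _ _
  have h0 : (As.drop 0).take As.length = As := by simp
  have key := goS_eq_foldl As Bs 0 As.length 0 (by omega) (by omega)
  rw [h0] at key
  rw [solutionGo_eq_goS, ← hBs, key]
  simp [Int.ofNat_eq_natCast]
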